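-- pv_equiv track=rewrite | github.com/VulcanLab/MCPThreatHive | core/intel_threat_generator.py | _group_intel_by_topic
-- ===== SOURCE A (Python) =====
-- from typing import Dict, Any, List, Optional
--
-- def _group_intel_by_topic(intel_items: List[Dict[str, Any]]) -> Dict[str, List[Dict[str, Any]]]:
--     """Group intelligence items by topic/theme"""
--     # Simple grouping by keywords
--     groups = {}
--
--     for item in intel_items:
--         content = (item.get('ai_summary') or item.get('content') or '').lower()
--         title = (item.get('title') or '').lower()
--
--         # Determine topic
--         topic = "general"
--         if any(kw in content or kw in title for kw in ['injection', 'prompt injection']):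
--             topic = "prompt_injection"
--         elif any(kw in content or kw in title for kw in ['tool', 'poisoning', 'tool poisoning']):
--             topic = "tool_poisoning"
--         elif any(kw in content or kw in title for kw in ['authentication', 'auth', 'credential']):
--             topic = "authentication"
--         elif any(kw in content or kw in title for kw in ['authorization', 'permission', 'access']):
--             topic = "authorization"
--         elif any(kw in content or kw in title for kw in ['data', 'leak', 'exposure', 'disclosure']):
--             topic = "data_disclosure"
--         elif any(kw in content or kw in title for kw in ['dos', 'denial', 'service', 'flooding']):
--             topic = "denial_of_service"
--         elif any(kw in content or kw in title for kw in ['server', 'mcp server']):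
--             topic = "mcp_server"
--         elif any(kw in content or kw in title for kw in ['client', 'mcp client']):
--             topic = "mcp_client"
--
--         if topic not in groups:
--             groups[topic] = []
--         groups[topic].append(item)
--
--     return groups
-- ===== SOURCE B (Python) =====
-- RULES = [
--     ("prompt_injection", ['injection', 'prompt injection']),
--     ("tool_poisoning", ['tool', 'poisoning', 'tool poisoning']),
--     ("authentication", ['authentication', 'auth', 'credential']),
--     ("authorization", ['authorization', 'permission', 'access']),
--     ("data_disclosure", ['data', 'leak', 'exposure', 'disclosure']),
--     ("denial_of_service", ['dos', 'denial', 'service', 'flooding']),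
--     ("mcp_server", ['server', 'mcp server']),
--     ("mcp_client", ['client', 'mcp client']),
-- ]
--
--
-- def _topic(item):
--     content = (item.get('ai_summary') or item.get('content') or '').lower()
--     title = (item.get('title') or '').lower()
--     return next((t for t, kws in RULES
--                  if any(kw in content or kw in title for kw in kws)), "general")
--
--
-- def _group_intel_by_topic(intel_items):
--     tagged = [(_topic(item), item) for item in intel_items]
--     order = list(dict.fromkeys(t for t, _ in tagged))
--     return {t: [item for tt, item in tagged if tt == t] for t in order}
-- ===== Notes on version B (the rewrite author's own statement) =====
-- stated objective: idiomatic
-- what changed: A's single pass that maintains a mutable dict (elif cascade picking the topic, if-not-in insert, append per item) is replaced by a tag-then-group decomposition: a rules table assigns each item its topic via first-match lookup, the distinct topics are deduplicated in first-occurrence order, and each group is built by filtering the tagged list.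
import Mathlib
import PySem

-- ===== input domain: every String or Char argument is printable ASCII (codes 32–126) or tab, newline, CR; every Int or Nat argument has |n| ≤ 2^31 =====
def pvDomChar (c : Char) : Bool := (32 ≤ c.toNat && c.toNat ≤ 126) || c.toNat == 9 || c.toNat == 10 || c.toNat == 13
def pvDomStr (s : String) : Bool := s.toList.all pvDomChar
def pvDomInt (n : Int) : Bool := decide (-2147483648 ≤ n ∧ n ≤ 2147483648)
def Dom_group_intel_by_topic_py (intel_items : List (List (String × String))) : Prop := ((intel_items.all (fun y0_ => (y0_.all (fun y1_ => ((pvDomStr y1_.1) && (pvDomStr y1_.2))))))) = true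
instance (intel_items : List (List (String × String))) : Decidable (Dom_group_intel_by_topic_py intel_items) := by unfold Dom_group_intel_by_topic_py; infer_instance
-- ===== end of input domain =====

-- B replaces A's incremental if-not-in-dict/append loop and elif cascade by a tag-then-group
-- decomposition: a rules table gives each item its topic, then the groups are built per distinct
-- topic by filtering (objective: more idiomatic decomposition; no speed claim).

-- ===== PORT A =====
-- item.get(k) on the dict `item` (association list, first match)
def pvGet (item : List (String × String)) (k : String) : Option String :=
  (item.find? (fun p => p.1 == k)).map (fun p => p.2)

-- Python `x or y` for an Optional[str] x: None and '' are falsy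
def pvOrStr (o : Option String) (y : String) : String :=
  match o with
  | some s => if s == "" then y else s
  | none => y

-- content = (item.get('ai_summary') or item.get('content') or '').lower()
def pvContent (item : List (String × String)) : String :=
  PySem.Str.lower (pvOrStr (pvGet item "ai_summary") (pvOrStr (pvGet item "content") ""))

-- title = (item.get('title') or '').lower()
def pvTitle (item : List (String × String)) : String :=
  PySem.Str.lower (pvOrStr (pvGet item "title") "")

-- any(kw in content or kw in title for kw in kws)
def pvHit (content title : String) (kws : List String) : Bool :=
  kws.any (fun kw => PySem.Str.isIn kw content || PySem.Str.isIn kw title)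

-- A's elif cascade assigning the topic
def topicA (item : List (String × String)) : String :=
  let content := pvContent item
  let title := pvTitle item
  if pvHit content title ["injection", "prompt injection"] then "prompt_injection"
  else if pvHit content title ["tool", "poisoning", "tool poisoning"] then "tool_poisoning"
  else if pvHit content title ["authentication", "auth", "credential"] then "authentication"
  else if pvHit content title ["authorization", "permission", "access"] then "authorization"
  else if pvHit content title ["data", "leak", "exposure", "disclosure"] then "data_disclosure"
  else if pvHit content title ["dos", "denial", "service", "flooding"] then "denial_of_service"
  else if pvHit content title ["server", "mcp server"] then "mcp_server"
  else if pvHit content title ["client", "mcp client"] then "mcp_client"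
  else "general"

def group_intel_by_topic_py (intel_items : List (List (String × String))) : List (String × List (List (String × String))) :=
  (intel_items.foldl
    (fun (groups : PySem.Dict String (List (List (String × String)))) item =>
      let topic := topicA item
      let groups := if groups.contains topic then groups else groups.insert topic []
      groups.modify topic [] (fun l => l ++ [item]))
    PySem.Dict.empty).items

-- ===== PORT B =====
def RULES : List (String × List String) :=
  [("prompt_injection", ["injection", "prompt injection"]),
   ("tool_poisoning", ["tool", "poisoning", "tool poisoning"]),
   ("authentication", ["authentication", "auth", "credential"]),
   ("authorization", ["authorization", "permission", "access"]),
   ("data_disclosure", ["data", "leak", "exposure", "disclosure"]),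
   ("denial_of_service", ["dos", "denial", "service", "flooding"]),
   ("mcp_server", ["server", "mcp server"]),
   ("mcp_client", ["client", "mcp client"])]

-- next((t for t, kws in RULES if any(...)), "general")
def topicB (item : List (String × String)) : String :=
  let content := pvContent item
  let title := pvTitle item
  ((RULES.find? (fun r => pvHit content title r.2)).map (fun r => r.1)).getD "general"

def group_intel_by_topic_py_alt (intel_items : List (List (String × String))) : List (String × List (List (String × String))) :=
  let tagged := intel_items.map (fun item => (topicB item, item))
  let order := PySem.List.dedup (tagged.map (fun p => p.1))
  order.map (fun t => (t, (tagged.filter (fun p => p.1 == t)).map (fun p => p.2)))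

-- ===== PRECONDITION & SPEC =====
def Spec_group_intel_by_topic_py (intel_items : List (List (String × String))) (out : List (String × List (List (String × String)))) : Prop := out = group_intel_by_topic_py_alt intel_items
instance (intel_items : List (List (String × String))) (out : List (String × List (List (String × String)))) : Decidable (Spec_group_intel_by_topic_py intel_items out) := by unfold Spec_group_intel_by_topic_py; infer_instance

-- ===== CLAIM (what is proved, stated in full; the proofs are below) =====
def Claim_equal_group_intel_by_topic_py : Prop := ∀ (intel_items : List (List (String × String))), Dom_group_intel_by_topic_py intel_items → Spec_group_intel_by_topic_py intel_items (group_intel_by_topic_py intel_items)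

-- ===== LEMMAS AND PROOFS =====

-- A's topic cascade agrees with B's first-matching-rule lookup
theorem topicA_eq_topicB (item : List (String × String)) : topicA item = topicB item := by
  unfold topicA topicB RULES
  simp only [List.find?]
  cases pvHit (pvContent item) (pvTitle item) ["injection", "prompt injection"] <;>
  cases pvHit (pvContent item) (pvTitle item) ["tool", "poisoning", "tool poisoning"] <;>
  cases pvHit (pvContent item) (pvTitle item) ["authentication", "auth", "credential"] <;>
  cases pvHit (pvContent item) (pvTitle item) ["authorization", "permission", "access"] <;>
  cases pvHit (pvContent item) (pvTitle item) ["data", "leak", "exposure", "disclosure"] <;>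
  cases pvHit (pvContent item) (pvTitle item) ["dos", "denial", "service", "flooding"] <;>
  cases pvHit (pvContent item) (pvTitle item) ["server", "mcp server"] <;>
  cases pvHit (pvContent item) (pvTitle item) ["client", "mcp client"] <;> rfl

-- proof-side abstraction of A's loop body, over already-tagged pairs
def pvStep {I : Type} (g : PySem.Dict String (List I)) (p : String × I) : PySem.Dict String (List I) :=
  let g := if g.contains p.1 then g else g.insert p.1 []
  g.modify p.1 [] (fun l => l ++ [p.2])

-- the grouping both programs denote, as a function of the tagged list
def pvG {I : Type} (ps : List (String × I)) : List (String × List I) :=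
  (PySem.List.dedup (ps.map (fun p => p.1))).map
    (fun t => (t, (ps.filter (fun p => p.1 == t)).map (fun p => p.2)))

theorem find_self_beq (t : String) (l : List String) (h : t ∈ l) :
    l.find? (fun x => x == t) = some t := by
  induction l with
  | nil => cases h
  | cons a l ih =>
    by_cases ha : a = t
    · simp [List.find?, ha]
    · have ht : t ∈ l := by
        cases h with
        | head => exact absurd rfl ha
        | tail _ h' => exact h'
      have hb : (a == t) = false := by simp [ha]
      simp [List.find?, hb, ih ht]

theorem dedup_append_singleton {α : Type} [BEq α] [LawfulBEq α] (xs : List α) (x : α) :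
    PySem.List.dedup (xs ++ [x]) =
      if x ∈ xs then PySem.List.dedup xs else PySem.List.dedup xs ++ [x] := by
  simp only [PySem.List.dedup_eq_ofList, PySem.Set.ofList_eq_foldl, List.foldl_append]
  simp only [List.foldl, PySem.Set.add, PySem.Set.contains]
  rw [← PySem.Set.ofList_eq_foldl]
  by_cases h : x ∈ xs
  · have hc : List.contains (PySem.Set.ofList xs) x = true := by
      simp only [List.contains_eq_mem, decide_eq_true_eq]
      exact (PySem.Set.mem_ofList xs x).2 h
    simp [h]
  · have hc : List.contains (PySem.Set.ofList xs) x = false := by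
      simp only [List.contains_eq_mem, decide_eq_false_iff_not]
      exact fun hm => h ((PySem.Set.mem_ofList xs x).1 hm)
    simp [h]

-- one step of A's loop extends the grouping by one tagged pair
theorem pvStep_G {I : Type} (qs : List (String × I)) (p : String × I) :
    pvStep (PySem.Dict.mk (pvG qs)) p = PySem.Dict.mk (pvG (qs ++ [p])) := by
  obtain ⟨t, v⟩ := p
  have hmem : ∀ y, y ∈ PySem.List.dedup (qs.map (fun p => p.1)) ↔ y ∈ qs.map (fun p => p.1) := by
    intro y; rw [PySem.List.dedup_eq_ofList]; exact PySem.Set.mem_ofList _ y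
  set ks := PySem.List.dedup (qs.map (fun p => p.1)) with hks
  set F : String → List I := fun t' => (qs.filter (fun p => p.1 == t')).map (fun p => p.2)
    with hF
  have hpvG : pvG qs = ks.map (fun t' => (t', F t')) := rfl
  have hany : ((pvG qs).any fun q => q.1 == t) = ks.any (fun t' => t' == t) := by
    rw [hpvG, List.any_map]; rfl
  have hfindG : (pvG qs).find? (fun q => q.1 == t)
      = (ks.find? (fun t' => t' == t)).map (fun t' => (t', F t')) := by
    rw [hpvG, List.find?_map]; rfl
  have hfilter : ∀ t', ((qs ++ [(t, v)]).filter (fun q => q.1 == t')).map (fun q => q.2)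
      = F t' ++ (if t = t' then [v] else []) := by
    intro t'
    rw [List.filter_append, List.map_append, hF]
    by_cases h : t = t'
    · subst h; simp [List.filter]
    · have hb : (t == t') = false := by simp [h]
      simp [List.filter, hb, h]
  by_cases ht : t ∈ ks
  · -- existing key: same key order, entry t gets v appended
    have htq : t ∈ qs.map (fun q => q.1) := (hmem t).1 ht
    have hanyt : ks.any (fun t' => t' == t) = true := by
      rw [List.any_eq_true]; exact ⟨t, ht, by simp⟩
    have hcont : (PySem.Dict.mk (pvG qs)).contains t = true := by
      show ((pvG qs).any fun q => q.1 == t) = true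
      rw [hany]; exact hanyt
    have hgetD : (PySem.Dict.mk (pvG qs)).getD t [] = F t := by
      show ((((pvG qs).find? (fun q => q.1 == t)).map (fun q => q.2)).getD []) = F t
      rw [hfindG, find_self_beq t ks ht]; rfl
    have hlhs : pvStep (PySem.Dict.mk (pvG qs)) (t, v)
        = PySem.Dict.mk ((pvG qs).map (fun (q : String × List I) => if q.1 == t then (t, F t ++ [v]) else q)) := by
      simp only [pvStep, hcont, if_true, PySem.Dict.modify, hgetD, PySem.Dict.insert]
    have hdt : PySem.List.dedup ((qs ++ [(t, v)]).map (fun q => q.1)) = ks := by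
      rw [List.map_append]
      simp only [List.map]
      rw [dedup_append_singleton]
      simp [htq, hks]
    have hrhs : pvG (qs ++ [(t, v)])
        = ks.map (fun t' => (t', F t' ++ (if t = t' then [v] else []))) := by
      unfold pvG
      rw [hdt]
      exact List.map_congr_left (fun t' _ => by rw [hfilter t'])
    rw [hlhs, hrhs, hpvG, List.map_map]
    congr 1
    apply List.map_congr_left
    intro t' ht'
    by_cases h : t' = t
    · subst h; simp [Function.comp]
    · have hb : (t' == t) = false := by simp [h]
      have hb2 : ¬ (t = t') := fun hh => h hh.symm
      simp [Function.comp, hb, hb2]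
  · -- new key: appended at the end with [v]
    have htq : t ∉ qs.map (fun q => q.1) := fun hh => ht ((hmem t).2 hh)
    have hanyt : ks.any (fun t' => t' == t) = false := by
      rw [List.any_eq_false]
      intro x hx
      have : ¬ x = t := fun he => ht (he ▸ hx)
      simp [this]
    have hcont : (PySem.Dict.mk (pvG qs)).contains t = false := by
      show ((pvG qs).any fun q => q.1 == t) = false
      rw [hany]; exact hanyt
    have hfindnone : ks.find? (fun t' => t' == t) = none := by
      rw [List.find?_eq_none]
      intro x hx
      have : ¬ x = t := fun he => ht (he ▸ hx)
      simp [this]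
    have hgetD : (PySem.Dict.mk (pvG qs ++ [(t, [])])).getD t [] = ([] : List I) := by
      show ((((pvG qs ++ [(t, [])]).find? (fun (q : String × List I) => q.1 == t)).map (fun (q : String × List I) => q.2)).getD []) = []
      rw [List.find?_append, hfindG, hfindnone]
      simp [List.find?]
    have hcont2 : (PySem.Dict.mk (pvG qs ++ [(t, [])])).contains t = true := by
      show ((pvG qs ++ [(t, [])]).any fun q => q.1 == t) = true
      simp [List.any_append]
    have hlhs : pvStep (PySem.Dict.mk (pvG qs)) (t, v)
        = PySem.Dict.mk ((pvG qs ++ [(t, [])]).map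
            (fun (q : String × List I) => if q.1 == t then (t, [v]) else q)) := by
      simp only [pvStep, hcont, Bool.false_eq_true, if_neg, not_false_eq_true,
        PySem.Dict.modify, hgetD, PySem.Dict.insert, hcont2, if_true, List.nil_append]
    have hdt : PySem.List.dedup ((qs ++ [(t, v)]).map (fun q => q.1)) = ks ++ [t] := by
      rw [List.map_append]
      simp only [List.map]
      rw [dedup_append_singleton]
      simp [htq, hks]
    have hfixt : F t = [] := by
      rw [hF]
      have : qs.filter (fun q => q.1 == t) = [] := by
        rw [List.filter_eq_nil_iff]
        intro x hx
        have : ¬ x.1 = t := fun he => htq (he ▸ List.mem_map_of_mem hx)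
        simp [this]
      simp [this]
    have hrhs : pvG (qs ++ [(t, v)])
        = (ks ++ [t]).map (fun t' => (t', F t' ++ (if t = t' then [v] else []))) := by
      unfold pvG
      rw [hdt]
      exact List.map_congr_left (fun t' _ => by rw [hfilter t'])
    rw [hlhs, hrhs]
    congr 1
    rw [List.map_append, List.map_append, hpvG, List.map_map]
    congr 1
    · apply List.map_congr_left
      intro t' ht'
      have hb : (t' == t) = false := by
        have : ¬ t' = t := fun he => ht (he ▸ ht')
        simp [this]
      have hb2 : ¬ (t = t') := fun hh => ht (hh ▸ ht')
      simp [Function.comp, hb, hb2]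
    · simp [hfixt]

theorem foldl_pvStep {I : Type} (ps qs : List (String × I)) :
    ps.foldl pvStep (PySem.Dict.mk (pvG qs)) = PySem.Dict.mk (pvG (qs ++ ps)) := by
  induction ps generalizing qs with
  | nil => simp
  | cons p ps ih =>
    rw [List.foldl_cons, pvStep_G, ih, List.append_assoc]
    rfl

-- ===== VERDICT (by name: the statement is the Claim_ definition above) =====
theorem group_intel_by_topic_py_spec : Claim_equal_group_intel_by_topic_py := by
  intro intel_items _
  unfold Spec_group_intel_by_topic_py group_intel_by_topic_py group_intel_by_topic_py_alt
  have hbody : (intel_items.foldl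
      (fun (groups : PySem.Dict String (List (List (String × String)))) item =>
        let topic := topicA item
        let groups := if groups.contains topic then groups else groups.insert topic []
        groups.modify topic [] (fun l => l ++ [item]))
      PySem.Dict.empty)
      = (intel_items.map (fun item => (topicB item, item))).foldl pvStep PySem.Dict.empty := by
    rw [List.foldl_map]
    have hfun : (fun (groups : PySem.Dict String (List (List (String × String)))) item =>
        let topic := topicA item
        let groups := if groups.contains topic then groups else groups.insert topic []
        groups.modify topic [] (fun l => l ++ [item]))
        = fun g item => pvStep g (topicB item, item) := by
      funext g item
      simp only [pvStep, topicA_eq_topicB]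
    rw [hfun]
  rw [hbody]
  have hempty : (PySem.Dict.empty : PySem.Dict String (List (List (String × String))))
      = PySem.Dict.mk (pvG []) := rfl
  rw [hempty, foldl_pvStep, List.nil_append]
  rfl
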